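-- pv_equiv track=rewrite | github.com/yesh-045/terminus-cli | src/terminus/ui/formatting.py | format_server_name
-- ===== SOURCE A (Python) =====
-- def format_server_name(key: str) -> str:
--     """Convert server key to human-readable name.
--
--     Args:
--         key: Server key (e.g., 'npmScripts')
--
--     Returns:
--         Human-readable name (e.g., 'NPM Scripts')
--     """
--     # Handle camelCase
--     result = ""
--     for i, char in enumerate(key):
--         if i > 0 and char.isupper() and key[i - 1].islower():
--             result += " "
--         result += char
--
--     # Handle snake_case and hyphenated names
--     result = result.replace("_", " ").replace("-", " ")
--
--     # Capitalize words, but preserve certain acronyms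
--     words = result.split()
--     formatted_words = []
--     acronyms = {"npm", "mcp", "api", "cli", "url", "uri", "id", "ui"}
--
--     for word in words:
--         if word.lower() in acronyms:
--             formatted_words.append(word.upper())
--         else:
--             formatted_words.append(word.capitalize())
--
--     return " ".join(formatted_words)
-- ===== SOURCE B (Python) =====
-- def format_server_name(key: str) -> str:
--     """Convert server key to human-readable name (single pass over key)."""
--     acronyms = {"npm", "mcp", "api", "cli", "url", "uri", "id", "ui"}
--     words = []
--     current = []
--     prev = ""
--     for ch in key:
--         if ch in "_-" or ch.isspace():
--             if current:
--                 words.append("".join(current))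
--             current = []
--         elif ch.isupper() and prev and prev.islower():
--             if current:
--                 words.append("".join(current))
--             current = [ch]
--         else:
--             current.append(ch)
--         prev = ch
--     if current:
--         words.append("".join(current))
--     return " ".join(
--         w.upper() if w.lower() in acronyms else w.capitalize() for w in words
--     )
-- ===== Notes on version B (the rewrite author's own statement) =====
-- stated objective: alternative
-- what changed: B builds the word list in a single pass over the key with a current-word buffer flushed at separator characters (underscore, hyphen, whitespace) and camelCase boundaries, instead of A's three-stage pipeline of building a spaced string, replacing separators, and splitting it.
import Mathlib
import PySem

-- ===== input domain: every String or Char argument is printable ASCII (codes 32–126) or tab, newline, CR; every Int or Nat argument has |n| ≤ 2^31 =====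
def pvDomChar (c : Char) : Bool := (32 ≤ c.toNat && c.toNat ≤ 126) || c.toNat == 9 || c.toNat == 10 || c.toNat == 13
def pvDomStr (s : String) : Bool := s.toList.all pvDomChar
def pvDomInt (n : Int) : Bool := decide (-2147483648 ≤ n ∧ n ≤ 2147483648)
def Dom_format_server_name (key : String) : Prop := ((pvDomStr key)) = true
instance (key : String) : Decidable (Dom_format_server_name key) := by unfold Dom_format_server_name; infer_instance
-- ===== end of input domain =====

-- ===== PORT A =====
-- B rebuilds the word list in one pass over the key (buffer + flush) instead of A's
-- build-string / replace / split pipeline; objective: alternative decomposition.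
-- Python str.capitalize(), exact on the ASCII domain
def pvCapitalize (w : List Char) : List Char :=
  match w with
  | [] => []
  | c :: rest => PySem.Chars.upperChar c :: rest.map PySem.Chars.lowerChar

def pvAcronyms : PySem.Set (List Char) :=
  PySem.Set.ofList ["npm".toList, "mcp".toList, "api".toList, "cli".toList,
                    "url".toList, "uri".toList, "id".toList, "ui".toList]

-- A's camelCase loop: for i, char in enumerate(key); key[i-1] via pyGet? (always in range, so getD false never fires)
def pvCamelA (cs : List Char) : List Char :=
  (PySem.List.enumerate cs).foldl
    (fun result ic =>
      (if decide (0 < ic.1) && PySem.Chars.isupper ic.2 &&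
          ((PySem.List.pyGet? cs (ic.1 - 1)).map PySem.Chars.islower).getD false
       then result ++ [' '] else result) ++ [ic.2]) []

def format_server_name (key : String) : String :=
  let result := pvCamelA key.toList
  let result := PySem.Chars.replace (PySem.Chars.replace result ['_'] [' ']) ['-'] [' ']
  let words := PySem.Chars.split₀ result
  let formatted := words.foldl
    (fun acc w =>
      acc ++ [if pvAcronyms.contains (PySem.Chars.lower w)
              then PySem.Chars.upper w
              else pvCapitalize w]) []
  String.mk (PySem.Chars.join [' '] formatted)

-- ===== PORT B =====
def format_server_name_alt (key : String) : String :=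
  let st := key.toList.foldl
    (fun (st : List (List Char) × List Char × Option Char) c =>
      let words := st.1
      let cur := st.2.1
      if c == '_' || c == '-' || PySem.Chars.isspace c then
        ((if cur.isEmpty then words else words ++ [cur]), [], some c)
      else if PySem.Chars.isupper c &&
              (match st.2.2 with | some p => PySem.Chars.islower p | none => false) then
        ((if cur.isEmpty then words else words ++ [cur]), [c], some c)
      else (words, cur ++ [c], some c))
    ([], [], none)
  let words := if st.2.1.isEmpty then st.1 else st.1 ++ [st.2.1]
  String.mk (PySem.Chars.join [' ']
    (words.map (fun w =>
      if pvAcronyms.contains (PySem.Chars.lower w)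
      then PySem.Chars.upper w
      else pvCapitalize w)))

-- ===== PRECONDITION & SPEC =====
def Spec_format_server_name (key : String) (out : String) : Prop := out = format_server_name_alt key
instance (key : String) (out : String) : Decidable (Spec_format_server_name key out) := by unfold Spec_format_server_name; infer_instance

-- ===== CLAIM (what is proved, stated in full; the proofs are below) =====
def Claim_equal_format_server_name : Prop := ∀ (key : String), Dom_format_server_name key → Spec_format_server_name key (format_server_name key)

-- ===== LEMMAS AND PROOFS =====
def pvSubst (c : Char) : Char := if c == '_' then ' ' else if c == '-' then ' ' else c

def pvBoundary (prev : Option Char) (c : Char) : Bool :=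
  PySem.Chars.isupper c && (match prev with | some p => PySem.Chars.islower p | none => false)

def pvSep (c : Char) : Bool := c == '_' || c == '-' || PySem.Chars.isspace c

def pvCamelRec (prev : Option Char) : List Char → List Char
  | [] => []
  | c :: rest => (if pvBoundary prev c then [' ', c] else [c]) ++ pvCamelRec (some c) rest

def pvGoB : List (List Char) → List Char → Option Char → List Char → List (List Char)
  | words, cur, _, [] => if cur.isEmpty then words else words ++ [cur]
  | words, cur, prev, c :: rest =>
    if pvSep c then
      pvGoB (if cur.isEmpty then words else words ++ [cur]) [] (some c) rest
    else if pvBoundary prev c then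
      pvGoB (if cur.isEmpty then words else words ++ [cur]) [c] (some c) rest
    else
      pvGoB words (cur ++ [c]) (some c) rest

lemma pvFoldlB_eq_goB (rest : List Char) : ∀ (words : List (List Char)) (cur : List Char) (prev : Option Char),
    (let st := rest.foldl
      (fun (st : List (List Char) × List Char × Option Char) c =>
        let words := st.1
        let cur := st.2.1
        if c == '_' || c == '-' || PySem.Chars.isspace c then
          ((if cur.isEmpty then words else words ++ [cur]), [], some c)
        else if PySem.Chars.isupper c &&
                (match st.2.2 with | some p => PySem.Chars.islower p | none => false) then
          ((if cur.isEmpty then words else words ++ [cur]), [c], some c)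
        else (words, cur ++ [c], some c))
      (words, cur, prev)
     if st.2.1.isEmpty then st.1 else st.1 ++ [st.2.1]) = pvGoB words cur prev rest := by
  induction rest with
  | nil => intro words cur prev; simp [pvGoB]
  | cons c rest ih =>
    intro words cur prev
    simp only [List.foldl_cons, pvGoB, pvSep, pvBoundary]
    by_cases h1 : (c == '_' || c == '-' || PySem.Chars.isspace c) = true
    · simp only [h1, if_true]; exact ih _ _ _
    · by_cases h2 : (PySem.Chars.isupper c &&
          (match prev with | some p => PySem.Chars.islower p | none => false)) = true
      · simp only [Bool.not_eq_true] at h1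
        simp only [h1, h2, Bool.false_eq_true, if_false, if_true]
        exact ih _ _ _
      · simp only [Bool.not_eq_true] at h1 h2
        simp only [h1, h2, Bool.false_eq_true, if_false]
        exact ih _ _ _

lemma pvCamelA_aux (cs : List Char) (suf : List Char) : ∀ (pre acc : List Char), cs = pre ++ suf →
    (PySem.List.enumerate suf (pre.length : Int)).foldl
      (fun result ic =>
        (if decide (0 < ic.1) && PySem.Chars.isupper ic.2 &&
            ((PySem.List.pyGet? cs (ic.1 - 1)).map PySem.Chars.islower).getD false
         then result ++ [' '] else result) ++ [ic.2]) acc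
      = acc ++ pvCamelRec pre.getLast? suf := by
  induction suf with
  | nil => intro pre acc h; simp [PySem.List.enumerate_nil, pvCamelRec]
  | cons c rest ih =>
    intro pre acc h
    rw [PySem.List.enumerate_cons, List.foldl_cons]
    have hstart : ((pre.length : Int) + 1) = ((pre ++ [c]).length : Int) := by
      simp
    have hcs : cs = (pre ++ [c]) ++ rest := by simpa using h
    have hlast : (pre ++ [c]).getLast? = some c := by simp
    have hcond : (decide (0 < (pre.length : Int)) && PySem.Chars.isupper c &&
        ((PySem.List.pyGet? cs ((pre.length : Int) - 1)).map PySem.Chars.islower).getD false)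
          = pvBoundary pre.getLast? c := by
      rcases List.eq_nil_or_concat' pre with hp | ⟨ps, p, hp⟩
      · subst hp
        simp [pvBoundary, Bool.and_comm]
      · subst hp
        have hidx : (((ps ++ [p]).length : Int) - 1) = ((ps.length : Nat) : Int) := by
          simp only [List.length_append, List.length_cons, List.length_nil]
          push_cast
          omega
        rw [hidx, PySem.List.pyGet?_natCast]
        have hget : cs[ps.length]? = some p := by
          rw [hcs, List.getElem?_append_left (by simp), List.getElem?_append_left (by simp),
            List.getElem?_concat_length]
        rw [hget]
        have : (ps ++ [p]).getLast? = some p := by simp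
        rw [this]
        simp [pvBoundary, Bool.and_comm]
    rw [hcond, hstart, ih (pre ++ [c]) _ hcs, hlast]
    simp only [pvCamelRec]
    by_cases hb : pvBoundary pre.getLast? c = true
    · simp [hb]
    · simp only [Bool.not_eq_true] at hb
      simp [hb]

lemma pvCamelA_eq_rec (cs : List Char) : pvCamelA cs = pvCamelRec none cs := by
  have := pvCamelA_aux cs cs [] [] (by simp)
  simpa [pvCamelA] using this

lemma pvReplaceGo_single (o n : Char) : ∀ (fuel : Nat) (l acc : List Char), l.length ≤ fuel →
    PySem.Chars.replace.go [o] [n] fuel l acc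
      = acc.reverse ++ l.map (fun c => if c == o then n else c) := by
  intro fuel
  induction fuel with
  | zero =>
    intro l acc h
    have : l = [] := List.length_eq_zero_iff.mp (Nat.le_zero.mp h)
    subst this
    simp [PySem.Chars.replace.go]
  | succ fuel ih =>
    intro l acc h
    cases l with
    | nil => simp [PySem.Chars.replace.go]
    | cons c t =>
      simp only [PySem.Chars.replace.go]
      by_cases hco : (o == c) = true
      · have hc : o = c := beq_iff_eq.mp hco
        subst hc
        have hpre : [o].isPrefixOf (o :: t) = true := by simp [List.isPrefixOf]
        simp only [hpre, if_true, List.drop_succ_cons, List.drop_zero, List.length_cons]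
        rw [ih _ _ (Nat.le_of_succ_le_succ (by simpa using h))]
        simp
      · have hne : o ≠ c := fun hc => hco (by simp [hc])
        have hpre : [o].isPrefixOf (c :: t) = false := by
          simp [List.isPrefixOf, hne]
        simp only [hpre, Bool.false_eq_true, if_false]
        rw [ih _ _ (Nat.le_of_succ_le_succ (by simpa using h))]
        have hcb : (c == o) = false := by simp [Ne.symm hne]
        simp [hcb]
        intro hc; exact absurd hc (Ne.symm hne)

lemma pvReplace_single (cs : List Char) (o n : Char) :
    PySem.Chars.replace cs [o] [n] = cs.map (fun c => if c == o then n else c) := by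
  simp only [PySem.Chars.replace, List.isEmpty_cons, Bool.false_eq_true, if_false]
  simpa using pvReplaceGo_single o n cs.length cs [] le_rfl

lemma pvReplace_both (cs : List Char) :
    PySem.Chars.replace (PySem.Chars.replace cs ['_'] [' ']) ['-'] [' '] = cs.map pvSubst := by
  rw [pvReplace_single, pvReplace_single, List.map_map]
  refine List.map_congr_left (fun c _ => ?_)
  simp only [Function.comp, pvSubst]
  by_cases h1 : (c == '_') = true
  · simp [h1, beq_iff_eq.mp h1]
  · simp only [h1, Bool.false_eq_true, if_false]

lemma pvUpper_toNat (c : Char) : PySem.Chars.isupper c = true ↔ 65 ≤ c.toNat ∧ c.toNat ≤ 90 := by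
  simp only [PySem.Chars.isupper, Bool.and_eq_true, decide_eq_true_eq]
  rw [Char.le_def, Char.le_def, UInt32.le_iff_toNat_le, UInt32.le_iff_toNat_le]
  constructor <;> intro h <;> exact h

lemma pvSpace_toNat (c : Char) (h : PySem.Chars.isspace c = true) : ¬ (65 ≤ c.toNat ∧ c.toNat ≤ 90) := by
  simp only [PySem.Chars.isspace] at h
  simp only [Bool.or_eq_true, Bool.and_eq_true, decide_eq_true_eq] at h
  omega

lemma pvSep_isupper (c : Char) (h : pvSep c = true) : PySem.Chars.isupper c = false := by
  simp only [pvSep, Bool.or_eq_true, beq_iff_eq] at h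
  rcases h with (h | h) | h
  · subst h; decide
  · subst h; decide
  · rw [Bool.eq_false_iff]
    intro hu
    exact pvSpace_toNat c h ((pvUpper_toNat c).mp hu)

lemma pvSep_boundary (prev : Option Char) (c : Char) (h : pvSep c = true) :
    pvBoundary prev c = false := by
  simp [pvBoundary, pvSep_isupper c h]

lemma pvSep_subst_isspace (c : Char) (h : pvSep c = true) :
    PySem.Chars.isspace (pvSubst c) = true := by
  simp only [pvSep, Bool.or_eq_true, beq_iff_eq] at h
  rcases h with (h | h) | h
  · subst h; decide
  · subst h; decide
  · have h1 : (c == '_') = false := by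
      rw [beq_eq_false_iff_ne]; rintro rfl; exact absurd h (by decide)
    have h2 : (c == '-') = false := by
      rw [beq_eq_false_iff_ne]; rintro rfl; exact absurd h (by decide)
    simpa [pvSubst, h1, h2] using h

lemma pvNotSep_subst (c : Char) (h : pvSep c = false) : pvSubst c = c := by
  simp only [pvSep, Bool.or_eq_false_iff] at h
  simp [pvSubst, h.1.1, h.1.2]

lemma pvNotSep_isspace (c : Char) (h : pvSep c = false) : PySem.Chars.isspace c = false := by
  simp only [pvSep, Bool.or_eq_false_iff] at h
  exact h.2

lemma pvSplit_go_camel (rest : List Char) : ∀ (prev : Option Char) (cur : List Char) (acc : List (List Char)),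
    PySem.Chars.split₀.go ((pvCamelRec prev rest).map pvSubst) cur acc
      = pvGoB acc.reverse cur.reverse prev rest := by
  induction rest with
  | nil =>
    intro prev cur acc
    simp only [pvCamelRec, List.map_nil, PySem.Chars.split₀.go, pvGoB,
      List.isEmpty_reverse]
    by_cases h : cur.isEmpty = true
    · simp [h]
    · simp only [Bool.not_eq_true] at h
      simp [h]
  | cons c rest ih =>
    intro prev cur acc
    by_cases hs : pvSep c = true
    · -- separator: A maps it to whitespace, split₀ flushes; B flushes
      have hb := pvSep_boundary prev c hs
      simp only [pvCamelRec, hb, Bool.false_eq_true, if_false, List.map_append,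
        List.map_cons, List.map_nil, List.singleton_append]
      simp only [PySem.Chars.split₀.go, pvSep_subst_isspace c hs, if_true]
      simp only [pvGoB, hs, if_true]
      by_cases h : cur.isEmpty = true
      · have hc : cur = [] := List.isEmpty_iff.mp h
        subst hc
        simpa using ih (some c) [] acc
      · simp only [Bool.not_eq_true] at h
        simp only [h, Bool.false_eq_true, if_false, List.isEmpty_reverse, h]
        have := ih (some c) [] (cur.reverse :: acc)
        simpa using this
    · simp only [Bool.not_eq_true] at hs
      have hsubst := pvNotSep_subst c hs
      have hsp := pvNotSep_isspace c hs
      by_cases hb : pvBoundary prev c = true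
      · -- camelCase boundary: A emits ' ' then c; B flushes and starts [c]
        simp only [pvCamelRec, hb, if_true, List.map_append, List.map_cons, List.map_nil]
        have hsp' : PySem.Chars.isspace (pvSubst ' ') = true := by decide
        simp only [List.cons_append, List.nil_append, PySem.Chars.split₀.go, hsp', if_true,
          hsubst, hsp, Bool.false_eq_true, if_false]
        simp only [pvGoB, hs, Bool.false_eq_true, if_false, hb, if_true]
        by_cases h : cur.isEmpty = true
        · have hc : cur = [] := List.isEmpty_iff.mp h
          subst hc
          simpa using ih (some c) [c] acc
        · simp only [Bool.not_eq_true] at h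
          simp only [h, Bool.false_eq_true, if_false, List.isEmpty_reverse, h]
          have := ih (some c) [c] (cur.reverse :: acc)
          simpa using this
      · -- plain character: both extend the current word
        simp only [Bool.not_eq_true] at hb
        simp only [pvCamelRec, hb, Bool.false_eq_true, if_false, List.map_append,
          List.map_cons, List.map_nil, List.singleton_append]
        simp only [PySem.Chars.split₀.go, hsubst, hsp, Bool.false_eq_true, if_false]
        simp only [pvGoB, hs, Bool.false_eq_true, if_false, hb]
        have := ih (some c) (c :: cur) acc
        simpa using this

lemma pvFoldl_push_eq_map {α β : Type} (l : List α) (g : α → β) : ∀ (acc : List β),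
    l.foldl (fun acc w => acc ++ [g w]) acc = acc ++ l.map g := by
  induction l with
  | nil => intro acc; simp
  | cons x xs ih => intro acc; simp [ih]

-- ===== VERDICT (by name: the statement is the Claim_ definition above) =====
theorem format_server_name_spec : Claim_equal_format_server_name := by
  intro key _
  unfold Spec_format_server_name format_server_name format_server_name_alt
  simp only [pvCamelA_eq_rec, pvReplace_both, pvFoldl_push_eq_map, List.nil_append,
    pvFoldlB_eq_goB]
  have h := pvSplit_go_camel key.toList none [] []
  simp only [PySem.Chars.split₀, List.reverse_nil] at h ⊢
  rw [h]
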